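-- pv_equiv track=rewrite | github.com/DongJunHan/algorithm | 프로그래머스/lv2/12911. 다음 큰 숫자/다음 큰 숫자.py | check_one_cnt
-- ===== SOURCE A (Python) =====
-- def check_one_cnt(n, cnt):
--     oc = 0
--     answer = True
--     while n > 0:
--         remain = n % 2
--         if remain == 1:
--             oc += 1
--         if oc > cnt:
--             answer = False
--             break
--         n = n // 2
--     if oc < cnt:
--         answer = False
--     return answer
-- ===== SOURCE B (Python) =====
-- def check_one_cnt(n, cnt):
--     oc = 0
--     answer = True
--     m = n
--     while m > 0:
--         m &= m - 1
--         oc += 1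
--         if oc > cnt:
--             answer = False
--             break
--     if oc < cnt:
--         answer = False
--     return answer
-- ===== Notes on version B (the rewrite author's own statement) =====
-- stated objective: alternative
-- what changed: Counts set bits with Brian Kernighan's m &= m-1 trick (one iteration per set bit) instead of dividing by 2 once per binary digit, keeping the same early-break and final oc<cnt comparison.
import Mathlib
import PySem

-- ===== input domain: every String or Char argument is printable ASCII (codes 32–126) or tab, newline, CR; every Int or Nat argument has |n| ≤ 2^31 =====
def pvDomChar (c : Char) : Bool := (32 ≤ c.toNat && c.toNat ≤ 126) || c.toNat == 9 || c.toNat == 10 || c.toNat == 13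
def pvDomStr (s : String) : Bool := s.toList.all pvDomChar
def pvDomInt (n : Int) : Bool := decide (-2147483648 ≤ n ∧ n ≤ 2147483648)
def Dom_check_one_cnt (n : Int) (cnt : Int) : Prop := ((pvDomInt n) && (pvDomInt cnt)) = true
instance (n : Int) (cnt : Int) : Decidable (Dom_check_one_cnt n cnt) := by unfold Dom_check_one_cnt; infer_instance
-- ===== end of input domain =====

-- B counts set bits with Kernighan's m &= m-1 (one step per set bit) instead of halving once
-- per binary digit; same early break and final comparison, same return value (alternative, not claimed faster).

-- ===== PORT A =====
-- while n > 0: remain = n % 2; if remain == 1: oc += 1; if oc > cnt: return False (break); n = n // 2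
-- after the loop: answer is False iff oc < cnt
def check_one_cnt_loopA (n : Int) (oc : Int) (cnt : Int) : Bool :=
  if h : n > 0 then
    let remain := PySem.Int.mod n 2
    let oc' := if remain = 1 then oc + 1 else oc
    if oc' > cnt then false
    else check_one_cnt_loopA (PySem.Int.floordiv n 2) oc' cnt
  else
    decide ¬(oc < cnt)
termination_by n.toNat
decreasing_by
  rw [PySem.Int.floordiv_eq_ediv_of_pos (by norm_num)]
  omega

def check_one_cnt (n : Int) (cnt : Int) : Bool :=
  check_one_cnt_loopA n 0 cnt

-- ===== PORT B =====
-- Nat.and_le_right, stated on Int: needed by the port itself for termination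
theorem pv_band_pred_toNat_lt (m : Int) (h : 0 < m) :
    (PySem.Int.band m (m - 1)).toNat < m.toNat := by
  rw [PySem.Int.band_of_nonneg (by omega) (by omega)]
  have := Nat.and_le_right (n := m.toNat) (m := (m - 1).toNat)
  omega

-- while m > 0: m &= m - 1; oc += 1; if oc > cnt: return False (break)
-- after the loop: answer is False iff oc < cnt
def check_one_cnt_loopB (m : Int) (oc : Int) (cnt : Int) : Bool :=
  if h : m > 0 then
    let m' := PySem.Int.band m (m - 1)
    let oc' := oc + 1
    if oc' > cnt then false
    else check_one_cnt_loopB m' oc' cnt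
  else
    decide ¬(oc < cnt)
termination_by m.toNat
decreasing_by
  exact pv_band_pred_toNat_lt m h

def check_one_cnt_alt (n : Int) (cnt : Int) : Bool :=
  check_one_cnt_loopB n 0 cnt

-- ===== PRECONDITION & SPEC =====
def Spec_check_one_cnt (n : Int) (cnt : Int) (out : Bool) : Prop := out = check_one_cnt_alt n cnt
instance (n : Int) (cnt : Int) (out : Bool) : Decidable (Spec_check_one_cnt n cnt out) := by unfold Spec_check_one_cnt; infer_instance

-- ===== CLAIM (what is proved, stated in full; the proofs are below) =====
def Claim_equal_check_one_cnt : Prop := ∀ (n : Int) (cnt : Int), Dom_check_one_cnt n cnt → Spec_check_one_cnt n cnt (check_one_cnt n cnt)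

-- ===== LEMMAS AND PROOFS =====

-- popcount of a doubled number
theorem pv_bitCount_two_mul (a : Nat) :
    PySem.Int.bitCount ((2 * a : Nat) : Int) = PySem.Int.bitCount (a : Int) := by
  rcases Nat.eq_zero_or_pos a with rfl | ha
  · simp
  · rw [PySem.Int.bitCount_natCast (by omega)]
    have h2 : 2 * a % 2 = 0 := by omega
    have h3 : 2 * a / 2 = a := by omega
    rw [h2, h3]; omega

-- popcount of a doubled-plus-one number
theorem pv_bitCount_two_mul_add_one (a : Nat) :
    PySem.Int.bitCount ((2 * a + 1 : Nat) : Int) = PySem.Int.bitCount (a : Int) + 1 := by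
  rw [PySem.Int.bitCount_natCast (by omega)]
  have h2 : (2 * a + 1) % 2 = 1 := by omega
  have h3 : (2 * a + 1) / 2 = a := by omega
  rw [h2, h3]; omega

-- the two bit-level identities behind Kernighan's trick, by testBit extensionality
theorem pv_land_odd (j : Nat) : (2 * j + 1) &&& (2 * j) = 2 * j := by
  apply Nat.eq_of_testBit_eq
  intro i
  cases i with
  | zero => simp [Nat.testBit_zero, Nat.land_comm, Nat.mul_comm]
  | succ k =>
    rw [Nat.testBit_and]
    simp only [Nat.testBit_succ]
    have h1 : (2 * j + 1) / 2 = j := by omega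
    have h2 : 2 * j / 2 = j := by omega
    rw [h1, h2, Bool.and_self]

theorem pv_land_even (j : Nat) (hj : 0 < j) :
    (2 * j) &&& (2 * j - 1) = 2 * (j &&& (j - 1)) := by
  apply Nat.eq_of_testBit_eq
  intro i
  cases i with
  | zero =>
    rw [Nat.testBit_and]
    simp only [Nat.testBit_zero]
    have h1 : 2 * j % 2 = 0 := by omega
    have h2 : 2 * (j &&& (j - 1)) % 2 = 0 := by omega
    simp [h1, h2]
  | succ k =>
    rw [Nat.testBit_and]
    simp only [Nat.testBit_succ]
    have h1 : 2 * j / 2 = j := by omega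
    have h2 : (2 * j - 1) / 2 = j - 1 := by omega
    have h3 : 2 * (j &&& (j - 1)) / 2 = j &&& (j - 1) := by omega
    rw [h1, h2, h3, Nat.testBit_and]

-- Kernighan: clearing the lowest set bit drops popcount by exactly one
theorem pv_kernighan (k : Nat) (hk : 0 < k) :
    PySem.Int.bitCount ((k &&& (k - 1) : Nat) : Int) + 1 = PySem.Int.bitCount (k : Int) := by
  induction k using Nat.strong_induction_on with
  | _ k ih =>
    rcases Nat.even_or_odd k with ⟨j, hj⟩ | ⟨j, hj⟩
    · -- k = 2 * j, j > 0
      have hj0 : 0 < j := by omega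
      have hk2 : k = 2 * j := by omega
      subst hk2
      rw [pv_land_even j hj0, pv_bitCount_two_mul, pv_bitCount_two_mul]
      rcases Nat.eq_zero_or_pos (j &&& (j - 1)) with hz | hp
      · rw [hz]
        have := ih j (by omega) hj0
        rw [← this, hz]
      · exact ih j (by omega) hj0
    · -- k = 2 * j + 1
      have hk2 : k = 2 * j + 1 := by omega
      subst hk2
      have : (2 * j + 1) - 1 = 2 * j := by omega
      rw [this, pv_land_odd, pv_bitCount_two_mul, pv_bitCount_two_mul_add_one]

-- on Int: for 0 < m, popcount (m & (m-1)) + 1 = popcount m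
theorem pv_kernighan_int (m : Int) (hm : 0 < m) :
    PySem.Int.bitCount (PySem.Int.band m (m - 1)) + 1 = PySem.Int.bitCount m := by
  rw [PySem.Int.band_of_nonneg (by omega) (by omega)]
  have hm1 : (m - 1).toNat = m.toNat - 1 := by omega
  have hmc : ((m.toNat : Nat) : Int) = m := by omega
  rw [hm1]
  calc PySem.Int.bitCount ((m.toNat &&& (m.toNat - 1) : Nat) : Int) + 1
      = PySem.Int.bitCount ((m.toNat : Nat) : Int) := pv_kernighan m.toNat (by omega)
    _ = PySem.Int.bitCount m := by rw [hmc]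

-- invariant: while oc ≤ cnt, A's loop computes "oc + popcount n = cnt" (for n ≥ 0)
theorem pv_loopA_eq (cnt : Int) : ∀ n oc : Int, 0 ≤ n → oc ≤ cnt →
    check_one_cnt_loopA n oc cnt = decide (oc + (PySem.Int.bitCount n : Int) = cnt) := by
  intro n oc
  induction n, oc using check_one_cnt_loopA.induct cnt with
  | case1 n oc h remain oc' hgt =>
    intro hn hle
    have hrem : remain = PySem.Int.mod n 2 := rfl
    have hoc' : oc' = if remain = 1 then oc + 1 else oc := by
      show oc' = _
      simp only [oc']
      split <;> rfl
    clear_value remain oc'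
    have hbc := PySem.Int.bitCount_of_pos (n := n) h
    have hmr : PySem.Int.mod n 2 = 0 ∨ PySem.Int.mod n 2 = 1 := by
      have h1 := PySem.Int.mod_nonneg (a := n) (b := 2) (by norm_num)
      have h2 := PySem.Int.mod_lt (a := n) (b := 2) (by norm_num)
      omega
    rw [check_one_cnt_loopA]
    simp only [h, dite_true]
    rw [← hrem, ← hoc', if_pos hgt]
    have hocv : oc' = oc + (PySem.Int.mod n 2).toNat := by
      rcases hmr with h0 | h1
      · rw [hoc', if_neg (by rw [hrem, h0]; norm_num), h0]; omega
      · rw [hoc', if_pos (by rw [hrem, h1]), h1]; omega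
    have : ¬ (oc + (PySem.Int.bitCount n : Int) = cnt) := by
      rcases hmr with h0 | h1 <;> omega
    exact (decide_eq_false this).symm
  | case2 n oc h remain oc' hgt ih =>
    intro hn hle
    have hrem : remain = PySem.Int.mod n 2 := rfl
    have hoc' : oc' = if remain = 1 then oc + 1 else oc := by
      show oc' = _
      simp only [oc']
      split <;> rfl
    clear_value remain oc'
    have hbc := PySem.Int.bitCount_of_pos (n := n) h
    have hmr : PySem.Int.mod n 2 = 0 ∨ PySem.Int.mod n 2 = 1 := by
      have h1 := PySem.Int.mod_nonneg (a := n) (b := 2) (by norm_num)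
      have h2 := PySem.Int.mod_lt (a := n) (b := 2) (by norm_num)
      omega
    have hfd : 0 ≤ PySem.Int.floordiv n 2 := by
      rw [PySem.Int.floordiv_eq_ediv_of_pos (by norm_num)]
      omega
    have hocv : oc' = oc + (PySem.Int.mod n 2).toNat := by
      rcases hmr with h0 | h1
      · rw [hoc', if_neg (by rw [hrem, h0]; norm_num), h0]; omega
      · rw [hoc', if_pos (by rw [hrem, h1]), h1]; omega
    have hocle : oc' ≤ cnt := by omega
    rw [check_one_cnt_loopA]
    simp only [h, dite_true]
    rw [← hrem, ← hoc', if_neg hgt, ih hfd hocle]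
    have : (oc' + (PySem.Int.bitCount (PySem.Int.floordiv n 2) : Int) = cnt)
         ↔ (oc + (PySem.Int.bitCount n : Int) = cnt) := by
      rcases hmr with h0 | h1 <;> omega
    simp only [decide_eq_decide]
    exact this
  | case3 n oc h =>
    intro hn hle
    rw [check_one_cnt_loopA]
    simp only [h, dite_false]
    have hn0 : n = 0 := by omega
    subst hn0
    have hb : PySem.Int.bitCount (0 : Int) = 0 := by decide
    rw [hb]
    by_cases hc : oc = cnt
    · simp [hc]
    · simp
      omega

-- invariant: while oc ≤ cnt, B's loop computes the same predicate (for m ≥ 0)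
theorem pv_loopB_eq (cnt : Int) : ∀ m oc : Int, 0 ≤ m → oc ≤ cnt →
    check_one_cnt_loopB m oc cnt = decide (oc + (PySem.Int.bitCount m : Int) = cnt) := by
  intro m oc
  induction m, oc using check_one_cnt_loopB.induct cnt with
  | case1 m oc h oc' hgt =>
    intro hm hle
    have hoc' : oc' = oc + 1 := rfl
    clear_value oc'
    have hk := pv_kernighan_int m h
    rw [check_one_cnt_loopB]
    simp only [h, dite_true]
    rw [← hoc', if_pos hgt]
    have : ¬ (oc + (PySem.Int.bitCount m : Int) = cnt) := by omega
    exact (decide_eq_false this).symm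
  | case2 m oc h m' oc' hgt ih =>
    intro hm hle
    have hm'v : m' = PySem.Int.band m (m - 1) := rfl
    have hoc' : oc' = oc + 1 := rfl
    clear_value m' oc'
    have hk := pv_kernighan_int m h
    have hm' : 0 ≤ PySem.Int.band m (m - 1) :=
      PySem.Int.band_nonneg_of_nonneg_left (m - 1) (by omega)
    rw [check_one_cnt_loopB]
    simp only [h, dite_true]
    rw [← hm'v, ← hoc', if_neg hgt, ih (by omega) (by omega)]
    have : (oc' + (PySem.Int.bitCount m' : Int) = cnt)
         ↔ (oc + (PySem.Int.bitCount m : Int) = cnt) := by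
      rw [hm'v, hoc']
      omega
    simp only [decide_eq_decide]
    exact this
  | case3 m oc h =>
    intro hm hle
    rw [check_one_cnt_loopB]
    simp only [h, dite_false]
    have hm0 : m = 0 := by omega
    subst hm0
    have hb : PySem.Int.bitCount (0 : Int) = 0 := by decide
    rw [hb]
    by_cases hc : oc = cnt
    · simp [hc]
    · simp
      omega

-- n > 0 and cnt < 0: A's loop breaks on the first iteration
theorem pv_loopA_neg (n cnt : Int) (hn : 0 < n) (hc : cnt < 0) :
    check_one_cnt_loopA n 0 cnt = false := by
  rw [check_one_cnt_loopA]
  simp only [hn, dite_true]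
  have : (if (if PySem.Int.mod n 2 = 1 then (0 : Int) + 1 else 0) > cnt then false
          else check_one_cnt_loopA (PySem.Int.floordiv n 2)
                 (if PySem.Int.mod n 2 = 1 then (0 : Int) + 1 else 0) cnt) = false := by
    rw [if_pos]
    split_ifs <;> omega
  exact this

-- n > 0 and cnt < 0: B's loop breaks on the first iteration
theorem pv_loopB_neg (n cnt : Int) (hn : 0 < n) (hc : cnt < 0) :
    check_one_cnt_loopB n 0 cnt = false := by
  rw [check_one_cnt_loopB]
  simp only [hn, dite_true]
  rw [if_pos (by omega)]

-- ===== VERDICT (by name: the statement is the Claim_ definition above) =====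
theorem check_one_cnt_spec : Claim_equal_check_one_cnt := by
  intro n cnt _
  unfold Spec_check_one_cnt check_one_cnt check_one_cnt_alt
  by_cases hn : 0 < n
  · by_cases hc : 0 ≤ cnt
    · rw [pv_loopA_eq cnt n 0 (by omega) (by omega),
          pv_loopB_eq cnt n 0 (by omega) (by omega)]
    · rw [pv_loopA_neg n cnt hn (by omega), pv_loopB_neg n cnt hn (by omega)]
  · rw [check_one_cnt_loopA, check_one_cnt_loopB]
    simp [hn]
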